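-- pv_equiv track=rewrite | github.com/surajn222/data-structures | strings/strings_questions/rearrange/0_find_the_minimum_number_of_inversions_needed_to_make_an_expression_balanced.py | findMinInversions
-- ===== SOURCE A (Python) =====
-- def findMinInversions(exp):
-- 	# if the expression has an odd length, it cannot be balanced
-- 	if len(exp) % 2:
-- 		return -1
--
-- 	inversions = 0  # stores total inversions needed
-- 	open = 0  # stores the total number of opening braces
--
-- 	# traverse the expression
-- 	for i in range(len(exp)):
--
-- 		# if the current character is an opening brace
-- 		if exp[i] == '{':
-- 			open = open + 1
--
-- 		# if the current character is a closing brace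
-- 		else:
-- 			# if an opening brace is found before, close it
-- 			if open:
-- 				open = open - 1  # decrement opening brace count
-- 			else:
-- 				# invert the closing brace, i.e., change '}' to '{'
-- 				inversions = inversions + 1  # increment total inversions needed by 1
-- 				open = 1  # increment opening brace count
--
-- 	# for `n` opened braces, exactly `n/2` inversions are needed
-- 	return inversions + open // 2
-- ===== SOURCE B (Python) =====
-- def findMinInversions(exp):
--     if len(exp) % 2:
--         return -1
--     # Balance-and-prefix-minimum method: treat '{' as +1 and '}' as -1.
--     # The lowest prefix balance gives the number of unmatched closing braces,
--     # and the final balance plus that gives the unmatched opening braces.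
--     bal = 0
--     low = 0
--     for c in exp:
--         bal += 1 if c == '{' else -1
--         low = min(low, bal)
--     close = -low
--     opens = bal + close
--     return (opens + 1) // 2 + (close + 1) // 2
-- ===== Notes on version B (the rewrite author's own statement) =====
-- stated objective: alternative
-- what changed: B replaces A's stateful matching simulation (branching on whether an unmatched open exists, counting inversions inline) by a balance/prefix-minimum computation: it tracks only the running +1/-1 balance and its minimum, derives unmatched closes = -min and unmatched opens = balance - min, and applies the ceiling formula at the end.
import Mathlib
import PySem

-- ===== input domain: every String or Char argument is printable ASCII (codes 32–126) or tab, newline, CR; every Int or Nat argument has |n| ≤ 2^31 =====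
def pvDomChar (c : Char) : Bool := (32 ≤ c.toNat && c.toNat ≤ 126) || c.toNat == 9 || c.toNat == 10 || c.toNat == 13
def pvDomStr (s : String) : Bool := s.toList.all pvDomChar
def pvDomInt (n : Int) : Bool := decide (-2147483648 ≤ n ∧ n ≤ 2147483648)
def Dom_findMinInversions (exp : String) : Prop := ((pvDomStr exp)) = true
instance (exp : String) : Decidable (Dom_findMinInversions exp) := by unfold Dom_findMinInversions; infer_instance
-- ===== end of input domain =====

-- B replaces A's matching simulation by a balance/prefix-minimum computation with a closing ceiling formula; no asymptotic change.

-- ===== PORT A =====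
-- loop state: (inversions, open), updated exactly as A's branches do
def findMinInversions (exp : String) : Int :=
  if PySem.Int.mod (PySem.Str.len exp) 2 ≠ 0 then -1
  else
    let st := exp.toList.foldl (fun (p : Int × Int) c =>
      if c = '{' then (p.1, p.2 + 1)
      else if p.2 ≠ 0 then (p.1, p.2 - 1)
      else (p.1 + 1, 1)) (0, 0)
    st.1 + PySem.Int.floordiv st.2 2

-- ===== PORT B =====
-- loop state: (bal, low) = running +1/-1 balance and its prefix minimum
def findMinInversions_alt (exp : String) : Int :=
  if PySem.Int.mod (PySem.Str.len exp) 2 ≠ 0 then -1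
  else
    let st := exp.toList.foldl (fun (p : Int × Int) c =>
      let bal := p.1 + (if c = '{' then 1 else -1)
      (bal, min p.2 bal)) (0, 0)
    let close := -st.2
    let opens := st.1 + close
    PySem.Int.floordiv (opens + 1) 2 + PySem.Int.floordiv (close + 1) 2

-- ===== PRECONDITION & SPEC =====
def Spec_findMinInversions (exp : String) (out : Int) : Prop := out = findMinInversions_alt exp
instance (exp : String) (out : Int) : Decidable (Spec_findMinInversions exp out) := by unfold Spec_findMinInversions; infer_instance

-- ===== CLAIM (what is proved, stated in full; the proofs are below) =====
def Claim_equal_findMinInversions : Prop := ∀ (exp : String), Dom_findMinInversions exp → Spec_findMinInversions exp (findMinInversions exp)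

-- ===== LEMMAS AND PROOFS =====

-- relation between A's state (inversions, open) and B's state (bal, low)
def pvRel (a b : Int × Int) : Prop :=
  b.2 ≤ 0 ∧ b.2 ≤ b.1 ∧ a.2 = b.1 - b.2 + (-b.2) % 2 ∧ a.1 = (-b.2 + 1) / 2

def pvStepA (p : Int × Int) (c : Char) : Int × Int :=
  if c = '{' then (p.1, p.2 + 1) else if p.2 ≠ 0 then (p.1, p.2 - 1) else (p.1 + 1, 1)

def pvStepB (p : Int × Int) (c : Char) : Int × Int :=
  let bal := p.1 + (if c = '{' then 1 else -1)
  (bal, min p.2 bal)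

theorem pvRel_step (a b : Int × Int) (c : Char) (h : pvRel a b) :
    pvRel (pvStepA a c) (pvStepB b c) := by
  obtain ⟨h1, h2, h3, h4⟩ := h
  unfold pvStepA pvStepB pvRel
  by_cases hc : c = '{'
  · simp only [hc, if_pos]
    refine ⟨by omega, by omega, by omega, by omega⟩
  · simp only [hc, ite_false]
    split_ifs <;> refine ⟨by omega, by omega, by omega, by omega⟩

theorem pvRel_fold (l : List Char) (a b : Int × Int) (h : pvRel a b) :
    pvRel (l.foldl pvStepA a) (l.foldl pvStepB b) := by
  induction l generalizing a b with
  | nil => exact h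
  | cons c t ih => exact ih _ _ (pvRel_step a b c h)

-- the running balance has the parity of the processed length
theorem pvB_parity (l : List Char) (b : Int × Int) :
    (l.foldl pvStepB b).1 % 2 = (b.1 + l.length) % 2 := by
  induction l generalizing b with
  | nil => simp
  | cons c t ih =>
      simp only [List.foldl_cons, List.length_cons]
      rw [ih]
      unfold pvStepB
      split_ifs <;> (push_cast; omega)

-- ===== VERDICT (by name: the statement is the Claim_ definition above) =====
theorem findMinInversions_spec : Claim_equal_findMinInversions := by
  intro exp _
  unfold Spec_findMinInversions findMinInversions findMinInversions_alt
  by_cases hodd : PySem.Int.mod (PySem.Str.len exp) 2 ≠ 0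
  · rw [if_pos hodd, if_pos hodd]
  · rw [if_neg hodd, if_neg hodd]
    have hrel := pvRel_fold exp.toList (0, 0) (0, 0) ⟨le_refl 0, le_refl 0, by norm_num, by norm_num⟩
    have hpar := pvB_parity exp.toList (0, 0)
    have hlen : PySem.Str.len exp = (exp.toList.length : Int) := by
      simp [String.length_toList]
    rw [hlen, PySem.Int.mod_eq_emod_of_pos (by norm_num : (0:Int) < 2)] at hodd
    set a := exp.toList.foldl pvStepA (0, 0) with ha
    set b := exp.toList.foldl pvStepB (0, 0) with hb
    show a.1 + PySem.Int.floordiv a.2 2 =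
      PySem.Int.floordiv (b.1 + -b.2 + 1) 2 + PySem.Int.floordiv (-b.2 + 1) 2
    obtain ⟨h1, h2, h3, h4⟩ := hrel
    rw [PySem.Int.floordiv_eq_ediv_of_pos (by norm_num : (0:Int) < 2),
        PySem.Int.floordiv_eq_ediv_of_pos (by norm_num : (0:Int) < 2),
        PySem.Int.floordiv_eq_ediv_of_pos (by norm_num : (0:Int) < 2)]
    simp only [not_not] at hodd
    omega
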